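-- pv_equiv track=rewrite | github.com/hidetomo0102/algorithm-and-data-structure | lesson.py | snake_string_v1
-- ===== SOURCE A (Python) =====
-- from typing import List
--
-- def snake_string_v1(chars: str) -> List[List[str]]:
--     result = [[], [], []]
--     result_idxes = {0, 1, 2}
--     insert_idx = 0
--
--     for i, s in enumerate(chars):
--         if i % 4 == 1:
--             insert_idx = 0
--         elif i % 2 == 0:
--             insert_idx = 1
--         elif i % 4 == 3:
--             insert_idx = 2
--
--         result[insert_idx].append(s)
--         for rest_idx in result_idxes - {insert_idx}:
--             result[rest_idx].append(' ')
--     return result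
-- ===== SOURCE B (Python) =====
-- from typing import List
--
-- def snake_string_v1(chars: str) -> List[List[str]]:
--     # Build each of the three rows independently with one comprehension each.
--     return [
--         [c if i % 4 == 1 else ' ' for i, c in enumerate(chars)],
--         [c if i % 2 == 0 else ' ' for i, c in enumerate(chars)],
--         [c if i % 4 == 3 else ' ' for i, c in enumerate(chars)],
--     ]
-- ===== Notes on version B (the rewrite author's own statement) =====
-- stated objective: simpler
-- what changed: B builds each of the three rows independently with a comprehension over enumerate(chars) using a closed predicate per row (i%4==1, i%2==0, i%4==3), instead of A's single column-wise pass that maintains a mutable insert_idx state and fills the other rows via a set-difference inner loop.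
import Mathlib
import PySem

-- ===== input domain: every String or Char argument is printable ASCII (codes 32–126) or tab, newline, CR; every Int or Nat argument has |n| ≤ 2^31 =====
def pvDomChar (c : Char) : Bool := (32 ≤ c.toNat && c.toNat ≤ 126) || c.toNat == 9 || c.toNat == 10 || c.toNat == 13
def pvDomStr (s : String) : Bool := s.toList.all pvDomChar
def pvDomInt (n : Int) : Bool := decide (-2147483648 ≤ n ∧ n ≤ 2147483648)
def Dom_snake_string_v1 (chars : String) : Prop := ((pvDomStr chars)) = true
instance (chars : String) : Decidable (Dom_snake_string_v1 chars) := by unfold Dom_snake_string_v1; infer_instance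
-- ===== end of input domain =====

-- B builds each of the three rows independently (one map per row with a closed
-- predicate) instead of A's single column-wise pass with a mutable insert index
-- and a set-difference inner loop; objective: simpler.

-- Python's enumerate over the characters of a string, starting at n
def pyEnum (n : Nat) : List Char → List (Nat × Char)
  | [] => []
  | c :: cs => (n, c) :: pyEnum (n + 1) cs

-- ===== PORT A =====
-- one iteration of A's loop body: pick insert_idx, append s there, ' ' to the rest
def snakeStepA (st : List String × List String × List String × Nat) (p : Nat × Char) :
    List String × List String × List String × Nat :=
  let (r0, r1, r2, idx) := st
  let i := p.1
  let s := p.2.toString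
  let j := if i % 4 = 1 then 0 else if i % 2 = 0 then 1 else if i % 4 = 3 then 2 else idx
  if j = 0 then (r0 ++ [s], r1 ++ [" "], r2 ++ [" "], j)
  else if j = 1 then (r0 ++ [" "], r1 ++ [s], r2 ++ [" "], j)
  else (r0 ++ [" "], r1 ++ [" "], r2 ++ [s], j)

def snake_string_v1 (chars : String) : List (List String) :=
  let st := (pyEnum 0 chars.toList).foldl snakeStepA ([], [], [], 0)
  [st.1, st.2.1, st.2.2.1]

-- ===== PORT B =====
def snake_string_v1_alt (chars : String) : List (List String) :=
  let xs := pyEnum 0 chars.toList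
  [xs.map (fun p => if p.1 % 4 = 1 then p.2.toString else " "),
   xs.map (fun p => if p.1 % 2 = 0 then p.2.toString else " "),
   xs.map (fun p => if p.1 % 4 = 3 then p.2.toString else " ")]

-- ===== PRECONDITION & SPEC =====
def Spec_snake_string_v1 (chars : String) (out : List (List String)) : Prop := out = snake_string_v1_alt chars
instance (chars : String) (out : List (List String)) : Decidable (Spec_snake_string_v1 chars out) := by unfold Spec_snake_string_v1; infer_instance

-- ===== CLAIM (what is proved, stated in full; the proofs are below) =====
def Claim_equal_snake_string_v1 : Prop := ∀ (chars : String), Dom_snake_string_v1 chars → Spec_snake_string_v1 chars (snake_string_v1 chars)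

-- ===== LEMMAS AND PROOFS =====

-- loop invariant: A's fold appends exactly B's three rows to the accumulators
lemma snake_fold_inv (l : List Char) : ∀ (n : Nat) (r0 r1 r2 : List String) (idx : Nat),
    ∃ idx', (pyEnum n l).foldl snakeStepA (r0, r1, r2, idx) =
      (r0 ++ (pyEnum n l).map (fun p => if p.1 % 4 = 1 then p.2.toString else " "),
       r1 ++ (pyEnum n l).map (fun p => if p.1 % 2 = 0 then p.2.toString else " "),
       r2 ++ (pyEnum n l).map (fun p => if p.1 % 4 = 3 then p.2.toString else " "),
       idx') := by
  induction l with
  | nil => intro n r0 r1 r2 idx; exact ⟨idx, by simp [pyEnum]⟩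
  | cons c cs ih =>
    intro n r0 r1 r2 idx
    have h4 : n % 4 = 0 ∨ n % 4 = 1 ∨ n % 4 = 2 ∨ n % 4 = 3 := by omega
    rcases h4 with h | h | h | h
    · have h2 : n % 2 = 0 := by omega
      obtain ⟨i', hi⟩ := ih (n + 1) (r0 ++ [" "]) (r1 ++ [c.toString]) (r2 ++ [" "]) 1
      exact ⟨i', by simp [pyEnum, snakeStepA, h, h2] at hi ⊢; exact hi⟩
    · have h2 : n % 2 = 1 := by omega
      obtain ⟨i', hi⟩ := ih (n + 1) (r0 ++ [c.toString]) (r1 ++ [" "]) (r2 ++ [" "]) 0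
      exact ⟨i', by simp [pyEnum, snakeStepA, h, h2] at hi ⊢; exact hi⟩
    · have h2 : n % 2 = 0 := by omega
      obtain ⟨i', hi⟩ := ih (n + 1) (r0 ++ [" "]) (r1 ++ [c.toString]) (r2 ++ [" "]) 1
      exact ⟨i', by simp [pyEnum, snakeStepA, h, h2] at hi ⊢; exact hi⟩
    · have h2 : n % 2 = 1 := by omega
      obtain ⟨i', hi⟩ := ih (n + 1) (r0 ++ [" "]) (r1 ++ [" "]) (r2 ++ [c.toString]) 2
      exact ⟨i', by simp [pyEnum, snakeStepA, h, h2] at hi ⊢; exact hi⟩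

-- ===== VERDICT (by name: the statement is the Claim_ definition above) =====
theorem snake_string_v1_spec : Claim_equal_snake_string_v1 := by
  intro chars _
  unfold Spec_snake_string_v1 snake_string_v1 snake_string_v1_alt
  obtain ⟨idx', h⟩ := snake_fold_inv chars.toList 0 [] [] [] 0
  simp [h]
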